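-- pv_equiv track=rewrite | github.com/felizvida/genomeforge | web_ui.py | _slice_circular
-- ===== SOURCE A (Python) =====
-- def _slice_circular(seq: str, start: int, length: int) -> str:
--     n = len(seq)
--     if n == 0 or length <= 0:
--         return ""
--     out = []
--     for i in range(length):
--         out.append(seq[(start + i) % n])
--     return "".join(out)
-- ===== SOURCE B (Python) =====
-- def _slice_circular(seq: str, start: int, length: int) -> str:
--     n = len(seq)
--     if n == 0 or length <= 0:
--         return ""
--     s = start % n
--     reps = (s + length + n - 1) // n
--     return (seq * reps)[s:s + length]
-- ===== Notes on version B (the rewrite author's own statement) =====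
-- stated objective: idiomatic
-- what changed: Replaces the per-character modular-index loop with normalizing start once (start % n), repeating the string ceil((s+length)/n) times, and taking a single contiguous slice.
import Mathlib
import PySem

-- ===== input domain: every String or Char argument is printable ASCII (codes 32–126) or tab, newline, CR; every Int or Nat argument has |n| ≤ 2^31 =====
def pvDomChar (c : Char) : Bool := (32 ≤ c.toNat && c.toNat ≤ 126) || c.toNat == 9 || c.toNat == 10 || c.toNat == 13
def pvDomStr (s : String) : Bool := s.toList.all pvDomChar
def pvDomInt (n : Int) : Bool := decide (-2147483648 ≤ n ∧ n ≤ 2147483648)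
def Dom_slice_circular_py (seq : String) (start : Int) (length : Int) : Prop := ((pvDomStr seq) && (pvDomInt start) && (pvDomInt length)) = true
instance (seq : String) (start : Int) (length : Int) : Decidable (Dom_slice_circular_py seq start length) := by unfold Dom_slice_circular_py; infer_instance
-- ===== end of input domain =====

-- B replaces A's per-character modular loop with one modulo, string repetition and a single slice (idiomatic).

-- ===== PORT A =====
-- A: loop i in range(length), append seq[(start+i) % n]; index always in range, so pyGetD's default is never used
def slice_circular_py (seq : String) (start : Int) (length : Int) : String :=
  let cs := seq.toList
  let n : Int := (cs.length : Int)
  if n = 0 ∨ length ≤ 0 then ""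
  else
    String.mk ((PySem.List.pyRange 0 length 1).foldl
      (fun acc i => acc ++ [PySem.List.pyGetD cs (PySem.Int.mod (start + i) n) ' ']) [])

-- ===== PORT B =====
-- B: s = start % n; reps = (s+length+n-1)//n; return (seq*reps)[s:s+length]
def slice_circular_py_alt (seq : String) (start : Int) (length : Int) : String :=
  let cs := seq.toList
  let n : Int := (cs.length : Int)
  if n = 0 ∨ length ≤ 0 then ""
  else
    let s := PySem.Int.mod start n
    let reps := PySem.Int.floordiv (s + length + n - 1) n
    String.mk (PySem.List.slice ((List.replicate reps.toNat cs).flatten) (some s) (some (s + length)))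

-- ===== PRECONDITION & SPEC =====
def Spec_slice_circular_py (seq : String) (start : Int) (length : Int) (out : String) : Prop := out = slice_circular_py_alt seq start length
instance (seq : String) (start : Int) (length : Int) (out : String) : Decidable (Spec_slice_circular_py seq start length out) := by unfold Spec_slice_circular_py; infer_instance

-- ===== CLAIM (what is proved, stated in full; the proofs are below) =====
def Claim_equal_slice_circular_py : Prop := ∀ (seq : String) (start : Int) (length : Int), Dom_slice_circular_py seq start length → Spec_slice_circular_py seq start length (slice_circular_py seq start length)

-- ===== LEMMAS AND PROOFS =====

-- length of a flattened replicate
theorem pv_len_flatten_replicate {α : Type} (cs : List α) (k : Nat) :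
    ((List.replicate k cs).flatten).length = k * cs.length := by
  simp only [List.length_flatten, List.map_replicate, List.sum_replicate, smul_eq_mul]

-- indexing into a flattened replicate wraps modulo the block length
theorem pv_getElem_flatten_replicate {α : Type} (cs : List α) (k j : Nat)
    (hcs : cs ≠ []) (hj' : j < ((List.replicate k cs).flatten).length) :
    ((List.replicate k cs).flatten)[j] = cs[j % cs.length]'(Nat.mod_lt _ (List.length_pos_iff.mpr hcs)) := by
  induction k generalizing j with
  | zero => simp at hj'
  | succ k ih =>
    simp only [List.replicate_succ, List.flatten_cons] at hj' ⊢
    rcases Nat.lt_or_ge j cs.length with h | h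
    · rw [List.getElem_append_left h]
      congr 1
      exact (Nat.mod_eq_of_lt h).symm
    · have hlt : j - cs.length < ((List.replicate k cs).flatten).length := by
        rw [List.length_append] at hj'
        omega
      rw [List.getElem_append_right h, ih (j - cs.length) hlt]
      congr 1
      conv_rhs => rw [show j = (j - cs.length) + 1 * cs.length by omega]
      rw [Nat.add_mul_mod_self_right]

theorem pv_main (seq : String) (start length : Int) :
    slice_circular_py seq start length = slice_circular_py_alt seq start length := by
  unfold slice_circular_py slice_circular_py_alt
  set cs := seq.toList with hcs
  by_cases h : (cs.length : Int) = 0 ∨ length ≤ 0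
  · rw [if_pos h, if_pos h]
  · rw [if_neg h, if_neg h]
    push_neg at h
    obtain ⟨hn0, hl0⟩ := h
    have hn : 0 < cs.length := by exact_mod_cast (by omega : (0:Int) < (cs.length:Int))
    have hcsne : cs ≠ [] := List.length_pos_iff.mp hn
    have hnpos : (0:Int) < (cs.length : Int) := by exact_mod_cast hn
    set n : Int := (cs.length : Int) with hndef
    set s : Int := PySem.Int.mod start n with hsdef
    have hs0 : 0 ≤ s := PySem.Int.mod_nonneg _ hnpos
    have hsn : s < n := PySem.Int.mod_lt _ hnpos
    set reps : Int := PySem.Int.floordiv (s + length + n - 1) n with hreps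
    -- reps * n covers s + length
    have hdm : reps * n + PySem.Int.mod (s + length + n - 1) n = s + length + n - 1 := by
      rw [hreps]; exact PySem.Int.floordiv_mul_add_mod _ _
    have hmlt := PySem.Int.mod_lt (s + length + n - 1) hnpos
    have hmge := PySem.Int.mod_nonneg (s + length + n - 1) hnpos
    have hcover : s + length ≤ reps * n := by omega
    congr 1
    -- rewrite A's foldl as a map over a range
    rw [PySem.List.foldl_append_singleton_eq_map, PySem.List.pyRange_one 0 length, List.map_map,
      List.nil_append]
    -- rewrite B's slice as drop/take
    rw [PySem.List.slice_toNat _ hs0 (by omega : (0:Int) ≤ s + length)]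
    set L : Nat := length.toNat with hL
    have hLeq : (L : Int) = length := Int.toNat_of_nonneg (by omega)
    have hflatlen := pv_len_flatten_replicate cs reps.toNat
    have hrepsnn : 0 ≤ reps := by nlinarith [hcover, hs0, hl0, hnpos]
    have hcovN : s.toNat + L ≤ reps.toNat * cs.length := by
      have : ((s.toNat + L : Nat) : Int) ≤ ((reps.toNat * cs.length : Nat) : Int) := by
        push_cast
        rw [Int.toNat_of_nonneg hs0, hLeq, Int.toNat_of_nonneg hrepsnn]
        exact hcover
      exact_mod_cast this
    have hsl : (s + length).toNat = s.toNat + L := by omega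
    apply List.ext_getElem
    · simp only [List.length_map, List.length_range, List.length_take, List.length_drop,
        hsl, Int.sub_zero]
      rw [← hreps, hflatlen]
      omega
    · intro i h1 h2
      simp only [List.length_map, List.length_range, Int.sub_zero] at h1
      rw [List.getElem_map, List.getElem_range, List.getElem_take, List.getElem_drop]
      simp only [Function.comp_apply]
      have hjlt' : s.toNat + i < ((List.replicate reps.toNat cs).flatten).length := by
        rw [hflatlen]; omega
      rw [pv_getElem_flatten_replicate cs reps.toNat (s.toNat + i) hcsne hjlt']
      -- A side: pyGetD with an always-in-range index
      have hmod0 : 0 ≤ PySem.Int.mod (start + (0 + (i:Int))) n := PySem.Int.mod_nonneg _ hnpos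
      have hmodlt : PySem.Int.mod (start + (0 + (i:Int))) n < n := PySem.Int.mod_lt _ hnpos
      rw [PySem.List.pyGetD_eq_getElem _ _ hmod0 (by exact_mod_cast hmodlt)]
      congr 1
      -- (s.toNat + i) % cs.length = ((start + i) mod n).toNat
      have hsemod : s = start % n := by rw [hsdef]; exact PySem.Int.mod_eq_emod_of_pos hnpos
      have hemod : PySem.Int.mod (start + (0 + (i:Int))) n = (start + (0 + (i:Int))) % n :=
        PySem.Int.mod_eq_emod_of_pos hnpos
      have hcast : (((s.toNat + i) % cs.length : Nat) : Int) = (start + (0 + (i:Int))) % n := by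
        push_cast
        rw [Int.toNat_of_nonneg hs0, hsemod, Int.zero_add, Int.add_emod start (i:Int) n]
        rw [← hndef, Int.add_emod (start % n) ((i:Int)) n,
          Int.add_emod (start % n) ((i:Int) % n) n]
        simp [Int.emod_emod_of_dvd]
      rw [hemod]
      omega

-- ===== VERDICT (by name: the statement is the Claim_ definition above) =====
theorem slice_circular_py_spec : Claim_equal_slice_circular_py := by
  intro seq start length _
  unfold Spec_slice_circular_py
  exact pv_main seq start length
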